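-- pv_equiv track=rewrite | github.com/sap218/jabberwocky | catch/catch.py | get_classterms_synonyms
-- ===== SOURCE A (Python) =====
-- def get_classterms_synonyms(classterms, classes, synonyms): # getting the words/classes their synonyms
--     for item in classterms:
--         try:
--             iri = classes[item]
--             for syn in synonyms:
--                 if synonyms[syn] == iri:
--                     classterms[item].append(syn)
--         except:
--             pass
--     return classterms
-- ===== SOURCE B (Python) =====
-- def get_classterms_synonyms(classterms, classes, synonyms):
--     # one pass over synonyms builds an inverse index iri -> [syn, ...],
--     # then each classterm does a single lookup (mutates classterms in place, like A)
--     by_iri = {}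
--     for syn, iri in synonyms.items():
--         by_iri.setdefault(iri, []).append(syn)
--     for item, terms in classterms.items():
--         if item in classes:
--             terms.extend(by_iri.get(classes[item], []))
--     return classterms
-- ===== Notes on version B (the rewrite author's own statement) =====
-- stated objective: faster
-- what changed: B builds an inverse index iri->synonym-list in one pass over synonyms and then does a single dict lookup per classterm, instead of A's rescan of all synonyms for every classterm.
import Mathlib
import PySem

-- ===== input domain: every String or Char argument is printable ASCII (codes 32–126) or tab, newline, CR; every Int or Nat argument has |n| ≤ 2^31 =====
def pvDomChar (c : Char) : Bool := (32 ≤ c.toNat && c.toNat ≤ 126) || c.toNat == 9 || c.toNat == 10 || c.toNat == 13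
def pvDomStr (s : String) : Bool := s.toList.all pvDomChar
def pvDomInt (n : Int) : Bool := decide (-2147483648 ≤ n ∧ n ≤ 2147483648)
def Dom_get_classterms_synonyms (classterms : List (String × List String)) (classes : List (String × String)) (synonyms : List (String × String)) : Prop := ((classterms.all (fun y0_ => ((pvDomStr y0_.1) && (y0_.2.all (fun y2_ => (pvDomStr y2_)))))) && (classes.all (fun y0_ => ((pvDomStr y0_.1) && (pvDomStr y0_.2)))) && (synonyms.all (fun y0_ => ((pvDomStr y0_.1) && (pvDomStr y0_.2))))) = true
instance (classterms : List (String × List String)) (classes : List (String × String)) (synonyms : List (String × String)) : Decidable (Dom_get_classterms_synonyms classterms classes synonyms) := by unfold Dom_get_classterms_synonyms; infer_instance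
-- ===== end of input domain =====

-- B replaces A's rescan of all synonyms per classterm by a one-pass inverse index iri -> synonyms
-- (asymptotically faster in a timing run); equivalence is about the RETURN value only
-- (the Python A and B both mutate `classterms` in place identically).


-- ===== PORT A =====
def get_classterms_synonyms (classterms : List (String × List String)) (classes : List (String × String)) (synonyms : List (String × String)) : List (String × List String) :=
  (((PySem.Dict.mk classterms).keys).foldl
    (fun d item =>
      match (PySem.Dict.mk classes).get? item with
      | none => d                       -- except: pass  (KeyError on classes[item])
      | some iri =>
          ((PySem.Dict.mk synonyms).keys).foldl
            (fun d syn =>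
              if (PySem.Dict.mk synonyms).get? syn = some iri then
                d.modify item [] (fun v => v ++ [syn])   -- classterms[item].append(syn)
              else d)
            d)
    (PySem.Dict.mk classterms)).items

-- ===== PORT B =====
def get_classterms_synonyms_alt (classterms : List (String × List String)) (classes : List (String × String)) (synonyms : List (String × String)) : List (String × List String) :=
  let by_iri := synonyms.foldl (fun d p => d.modify p.2 [] (fun v => v ++ [p.1])) PySem.Dict.empty
  classterms.map (fun p =>
    match (PySem.Dict.mk classes).get? p.1 with
    | none => p
    | some iri => (p.1, p.2 ++ by_iri.getD iri []))

-- ===== PRECONDITION & SPEC =====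
-- Pre_ excludes association lists with duplicate keys: the Python arguments are dicts, which
-- cannot contain duplicate keys, so the list encoding's behaviour there is accidental.
def Pre_get_classterms_synonyms (classterms : List (String × List String)) (classes : List (String × String)) (synonyms : List (String × String)) : Prop :=
  (classterms.map Prod.fst).Nodup ∧ (classes.map Prod.fst).Nodup ∧ (synonyms.map Prod.fst).Nodup
instance (classterms : List (String × List String)) (classes : List (String × String)) (synonyms : List (String × String)) : Decidable (Pre_get_classterms_synonyms classterms classes synonyms) := by unfold Pre_get_classterms_synonyms; infer_instance

def pvWitness_get_classterms_synonyms : (List (String × List String)) × (List (String × String)) × (List (String × String)) :=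
  ([("cat", ["feline"]), ("dog", [])], [("cat", "IRI1"), ("dog", "IRI3")], [("kitty", "IRI1"), ("puppy", "IRI2")])

def Spec_get_classterms_synonyms (classterms : List (String × List String)) (classes : List (String × String)) (synonyms : List (String × String)) (out : List (String × List String)) : Prop := out = get_classterms_synonyms_alt classterms classes synonyms
instance (classterms : List (String × List String)) (classes : List (String × String)) (synonyms : List (String × String)) (out : List (String × List String)) : Decidable (Spec_get_classterms_synonyms classterms classes synonyms out) := by unfold Spec_get_classterms_synonyms; infer_instance

-- ===== CLAIM (what is proved, stated in full; the proofs are below) =====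
def Claim_equal_get_classterms_synonyms : Prop := ∀ (classterms : List (String × List String)) (classes : List (String × String)) (synonyms : List (String × String)), Dom_get_classterms_synonyms classterms classes synonyms → Pre_get_classterms_synonyms classterms classes synonyms → Spec_get_classterms_synonyms classterms classes synonyms (get_classterms_synonyms classterms classes synonyms)

-- ===== LEMMAS AND PROOFS =====

lemma pv_modify_modify {κ ν : Type} [BEq κ] [LawfulBEq κ] (d : PySem.Dict κ ν) (k : κ) (d0 : ν) (f g : ν → ν) :
    (d.modify k d0 f).modify k d0 g = d.modify k d0 (fun v => g (f v)) := by
  unfold PySem.Dict.modify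
  rw [PySem.Dict.getD_insert_self, PySem.Dict.insert_insert_self]

lemma pv_insert_self {κ ν : Type} [BEq κ] [LawfulBEq κ] (d : PySem.Dict κ ν) (k : κ) (v : ν)
    (hm : (k, v) ∈ d.items) (hnd : d.keys.Nodup) : d.insert k v = d := by
  have hg : d.get? k = some v := PySem.Dict.get?_of_mem_items d hm hnd
  have hc : d.contains k = true := by rw [PySem.Dict.contains_eq_isSome_get?, hg]; rfl
  apply PySem.Dict.ext
  rw [PySem.Dict.items_insert_of_contains d v hc]
  conv_rhs => rw [← List.map_id d.items]
  apply List.map_congr_left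
  intro p hp
  by_cases hk : p.1 = k
  · have : d.get? p.1 = some p.2 := PySem.Dict.get?_of_mem_items d (by simpa using hp) hnd
    rw [hk] at this
    rw [this] at hg
    have hv : p.2 = v := by injection hg
    simp [hk]
    exact Prod.ext hk.symm hv.symm
  · simp [hk]

lemma pv_modify_id {κ ν : Type} [BEq κ] [LawfulBEq κ] (d : PySem.Dict κ ν) (k : κ) (d0 : ν)
    (hc : d.contains k = true) (hnd : d.keys.Nodup) : d.modify k d0 (fun v => v) = d := by
  rw [PySem.Dict.contains_eq_isSome_get?] at hc
  obtain ⟨v, hv⟩ := Option.isSome_iff_exists.mp hc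
  unfold PySem.Dict.modify
  rw [PySem.Dict.getD_eq_get?_getD, hv]
  exact pv_insert_self d k v (PySem.Dict.mem_items_of_get?_eq_some d hv) hnd

def pvMatched (synonyms : List (String × String)) (iri : String) : List String :=
  (synonyms.filter (fun p => p.2 == iri)).map (fun p => p.1)

lemma pv_inner_collapse (l : List (String × String)) (iri item : String)
    (d : PySem.Dict String (List String)) (hc : d.contains item = true) (hnd : d.keys.Nodup) :
    l.foldl (fun d p => if p.2 = iri then d.modify item [] (fun v => v ++ [p.1]) else d) d
      = d.modify item [] (fun v => v ++ pvMatched l iri) := by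
  induction l generalizing d with
  | nil =>
      simp only [List.foldl_nil, pvMatched, List.filter_nil, List.map_nil, List.append_nil]
      exact (pv_modify_id d item [] hc hnd).symm
  | cons p rest ih =>
      by_cases hp : p.2 = iri
      · have hc' : (d.modify item [] (fun v => v ++ [p.1])).contains item = true := by
          rw [PySem.Dict.contains_modify]; simp
        have hnd' : (d.modify item [] (fun v => v ++ [p.1])).keys.Nodup := by
          rw [PySem.Dict.keys_modify]
          rwa [PySem.Dict.keys_insert_of_contains _ _ hc]
        simp only [List.foldl_cons, hp, if_true]
        rw [ih _ hc' hnd', pv_modify_modify]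
        congr 1
        · funext v; simp [pvMatched, hp]
      · simp only [List.foldl_cons, hp, if_false]
        rw [ih _ hc hnd]
        congr 1
        funext v
        simp [pvMatched, hp]

lemma pv_inner (synonyms : List (String × String)) (iri item : String)
    (d : PySem.Dict String (List String)) (hs : (synonyms.map Prod.fst).Nodup)
    (hc : d.contains item = true) (hnd : d.keys.Nodup) :
    ((PySem.Dict.mk synonyms).keys).foldl
        (fun d syn => if (PySem.Dict.mk synonyms).get? syn = some iri then
            d.modify item [] (fun v => v ++ [syn]) else d) d
      = d.modify item [] (fun v => v ++ pvMatched synonyms iri) := by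
  have hk : (PySem.Dict.mk synonyms).keys = synonyms.map Prod.fst := rfl
  rw [hk, List.foldl_map]
  rw [PySem.List.foldl_congr_mem synonyms _
    (fun d p => if p.2 = iri then d.modify item [] (fun v => v ++ [p.1]) else d) d ?_]
  · exact pv_inner_collapse synonyms iri item d hc hnd
  · intro acc p hp
    have hg : (PySem.Dict.mk synonyms).get? p.1 = some p.2 :=
      PySem.Dict.get?_of_mem_items _ (by simpa using hp) (by simpa [hk] using hs)
    simp [hg]

lemma pv_index (synonyms : List (String × String)) (iri : String) :
    (synonyms.foldl (fun d p => d.modify p.2 [] (fun v => v ++ [p.1])) PySem.Dict.empty).getD iri []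
      = pvMatched synonyms iri := by
  have h : synonyms.foldl (fun d p => d.modify p.2 [] (fun v => v ++ [p.1])) PySem.Dict.empty
      = (synonyms.map Prod.swap).foldl (fun d p => d.modify p.1 [] (fun v => v ++ [p.2])) PySem.Dict.empty := by
    rw [List.foldl_map]; rfl
  rw [h, PySem.Dict.getD_foldl_modify_append, PySem.Dict.getD_empty]
  simp [List.filter_map, pvMatched, Function.comp_def]


lemma pv_outer (classes synonyms : List (String × String)) (hs : (synonyms.map Prod.fst).Nodup) :
    ∀ (l pre : List (String × List String)), ((pre ++ l).map Prod.fst).Nodup →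
    ((l.map Prod.fst).foldl
        (fun d item =>
          match (PySem.Dict.mk classes).get? item with
          | none => d
          | some iri =>
              ((PySem.Dict.mk synonyms).keys).foldl
                (fun d syn => if (PySem.Dict.mk synonyms).get? syn = some iri then
                    d.modify item [] (fun v => v ++ [syn]) else d) d)
        (PySem.Dict.mk (pre ++ l))).items
      = pre ++ l.map (fun p =>
          match (PySem.Dict.mk classes).get? p.1 with
          | none => p
          | some iri => (p.1, p.2 ++ pvMatched synonyms iri)) := by
  intro l
  induction l with
  | nil => intro pre _; simp
  | cons p rest ih =>
      intro pre hnd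
      have hnd' : ((pre ++ p :: rest).map Prod.fst).Nodup := hnd
      have hcont : (PySem.Dict.mk (pre ++ p :: rest)).contains p.1 = true := by
        rw [PySem.Dict.contains_eq_decide_mem_keys]
        simp [PySem.Dict.keys]
      have hndk : (PySem.Dict.mk (pre ++ p :: rest)).keys.Nodup := by
        simpa [PySem.Dict.keys] using hnd
      simp only [List.map_cons, List.foldl_cons]
      split
      next hcl =>
        have h2 := ih (pre ++ [p]) (by simpa using hnd')
        rw [List.append_assoc, List.singleton_append] at h2
        rw [h2]
        simp
      next iri hcl =>
        rw [pv_inner synonyms iri p.1 _ hs hcont hndk]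
        have hget : (PySem.Dict.mk (pre ++ p :: rest)).getD p.1 [] = p.2 :=
          PySem.Dict.getD_of_mem_items _ (by simp) hndk []
        have hp1pre : p.1 ∉ pre.map Prod.fst := by
          simp only [List.map_append, List.map_cons, List.nodup_append] at hnd'
          intro hmem
          exact hnd'.2.2 p.1 hmem p.1 List.mem_cons_self rfl
        have hp1rest : p.1 ∉ rest.map Prod.fst := by
          simp only [List.map_append, List.map_cons, List.nodup_append] at hnd'
          exact fun hmem => (List.nodup_cons.mp hnd'.2.1).1 hmem
        have hdict : (PySem.Dict.mk (pre ++ p :: rest)).modify p.1 [] (fun v => v ++ pvMatched synonyms iri)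
            = PySem.Dict.mk ((pre ++ [(p.1, p.2 ++ pvMatched synonyms iri)]) ++ rest) := by
          unfold PySem.Dict.modify
          rw [hget]
          apply PySem.Dict.ext
          rw [PySem.Dict.items_insert_of_contains _ _ hcont]
          show (pre ++ p :: rest).map _ = _
          rw [List.map_append, List.map_cons]
          have h1 : pre.map (fun q => if (q.1 == p.1) = true then (p.1, p.2 ++ pvMatched synonyms iri) else q) = pre := by
            apply List.map_congr_left (g := id) ?_ |>.trans (List.map_id pre)
            intro q hq
            have hne : q.1 ≠ p.1 := fun h => hp1pre (h ▸ List.mem_map_of_mem hq)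
            simp [hne]
          have h2 : rest.map (fun q => if (q.1 == p.1) = true then (p.1, p.2 ++ pvMatched synonyms iri) else q) = rest := by
            apply List.map_congr_left (g := id) ?_ |>.trans (List.map_id rest)
            intro q hq
            have hne : q.1 ≠ p.1 := fun h => hp1rest (h ▸ List.mem_map_of_mem hq)
            simp [hne]
          rw [h1, h2]
          simp
        rw [hdict]
        rw [ih (pre ++ [(p.1, p.2 ++ pvMatched synonyms iri)]) (by simpa using hnd')]
        simp

-- ===== VERDICT (by name: the statement is the Claim_ definition above) =====
theorem get_classterms_synonyms_spec : Claim_equal_get_classterms_synonyms := by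
  intro classterms classes synonyms _ hpre
  obtain ⟨hct, -, hs⟩ := hpre
  show get_classterms_synonyms classterms classes synonyms = get_classterms_synonyms_alt classterms classes synonyms
  unfold get_classterms_synonyms get_classterms_synonyms_alt
  have h := pv_outer classes synonyms hs classterms [] (by simpa using hct)
  simp only [List.nil_append] at h
  simp only [PySem.Dict.keys] at h ⊢
  rw [h]
  apply List.map_congr_left
  intro p _
  cases hcl : (PySem.Dict.mk classes).get? p.1 with
  | none => simp
  | some iri => simp [pv_index synonyms iri]
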